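-- pv_equiv track=rewrite | github.com/vyomakesh0728/reference-kernels | problems/amd/amd_kernel_rag/retriever.py | _salient_lines
-- ===== SOURCE A (Python) =====
-- def _salient_lines(text: str, keywords: set[str]) -> list[str]:
--     picked: list[str] = []
--     for line in text.splitlines():
--         stripped = line.strip()
--         if not stripped:
--             continue
--         lowered = stripped.lower()
--         if keywords and any(keyword in lowered for keyword in keywords):
--             picked.append(stripped)
--         if len(picked) == 4:
--             break
--     if not picked:
--         for line in text.splitlines():
--             stripped = line.strip()
--             if stripped:
--                 picked.append(stripped)
--             if len(picked) == 4:
--                 break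
--     return picked
-- ===== SOURCE B (Python) =====
-- def _salient_lines(text, keywords):
--     # One pass: collect both the keyword matches and the first-4-non-empty
--     # fallback simultaneously; stop as soon as 4 matches are found.
--     matches = []
--     fallback = []
--     for line in text.splitlines():
--         s = line.strip()
--         if not s:
--             continue
--         if len(fallback) < 4:
--             fallback.append(s)
--         if keywords and any(k in s.lower() for k in keywords):
--             matches.append(s)
--             if len(matches) == 4:
--                 break
--     return matches if matches else fallback
-- ===== Notes on version B (the rewrite author's own statement) =====
-- stated objective: alternative
-- what changed: Replaced A's two staged scans (keyword scan with break, then on failure a second full splitlines rescan for the fallback) by a single pass that maintains two bounded accumulators (matches and the first-4 fallback) simultaneously.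
import Mathlib
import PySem

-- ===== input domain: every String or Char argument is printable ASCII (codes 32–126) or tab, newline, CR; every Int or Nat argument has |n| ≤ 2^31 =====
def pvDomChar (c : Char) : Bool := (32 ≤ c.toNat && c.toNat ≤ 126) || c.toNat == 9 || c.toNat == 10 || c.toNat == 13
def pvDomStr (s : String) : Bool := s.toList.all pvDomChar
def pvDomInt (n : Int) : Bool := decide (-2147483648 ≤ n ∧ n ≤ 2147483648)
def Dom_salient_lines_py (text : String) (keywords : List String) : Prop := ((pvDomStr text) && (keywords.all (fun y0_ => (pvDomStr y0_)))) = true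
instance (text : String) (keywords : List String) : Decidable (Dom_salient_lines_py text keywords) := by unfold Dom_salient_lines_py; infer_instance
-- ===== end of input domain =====

-- B replaces A's two staged scans (keyword scan with break, then a second full splitlines
-- rescan for the fb) by one pass maintaining two bounded accumulators (objective: alternative).


-- ===== PORT A =====
-- first loop of A: pick keyword ms, break at 4
def pvPickKw (keywords : List String) : List String → List String → List String
  | [], picked => picked
  | line :: rest, picked =>
    let stripped := PySem.Str.strip line
    if stripped = "" then pvPickKw keywords rest picked
    else
      let lowered := PySem.Str.lower stripped
      let picked' := if !keywords.isEmpty && keywords.any (fun k => PySem.Str.isIn k lowered)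
                     then picked ++ [stripped] else picked
      if picked'.length = 4 then picked' else pvPickKw keywords rest picked'

-- fb loop of A: pick all non-empty stripped lines, break at 4
def pvPickAll : List String → List String → List String
  | [], picked => picked
  | line :: rest, picked =>
    let stripped := PySem.Str.strip line
    let picked' := if stripped = "" then picked else picked ++ [stripped]
    if picked'.length = 4 then picked' else pvPickAll rest picked'

def salient_lines_py (text : String) (keywords : List String) : List String :=
  let picked := pvPickKw keywords (PySem.Str.splitlines text) []
  if picked = [] then pvPickAll (PySem.Str.splitlines text) [] else picked

-- ===== PORT B =====
-- B's single pass: both accumulators carried together, early exit at 4 ms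
def pvScan (keywords : List String) : List String → List String → List String → List String × List String
  | [], ms, fb => (ms, fb)
  | line :: rest, ms, fb =>
    let s := PySem.Str.strip line
    if s = "" then pvScan keywords rest ms fb
    else
      let fb' := if fb.length < 4 then fb ++ [s] else fb
      if !keywords.isEmpty && keywords.any (fun k => PySem.Str.isIn k (PySem.Str.lower s)) then
        let ms' := ms ++ [s]
        if ms'.length = 4 then (ms', fb')
        else pvScan keywords rest ms' fb'
      else pvScan keywords rest ms fb'

def salient_lines_py_alt (text : String) (keywords : List String) : List String :=
  let mf := pvScan keywords (PySem.Str.splitlines text) [] []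
  if mf.1 = [] then mf.2 else mf.1

-- ===== PRECONDITION & SPEC =====
def Spec_salient_lines_py (text : String) (keywords : List String) (out : List String) : Prop := out = salient_lines_py_alt text keywords
instance (text : String) (keywords : List String) (out : List String) : Decidable (Spec_salient_lines_py text keywords out) := by unfold Spec_salient_lines_py; infer_instance

-- ===== CLAIM (what is proved, stated in full; the proofs are below) =====
def Claim_equal_salient_lines_py : Prop := ∀ (text : String) (keywords : List String), Dom_salient_lines_py text keywords → Spec_salient_lines_py text keywords (salient_lines_py text keywords)

-- ===== LEMMAS AND PROOFS =====

-- abbreviations used only by the proofs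
def pvN (ls : List String) : List String := (ls.map PySem.Str.strip).filter (fun s => s != "")
def pvM (keywords ls : List String) : List String :=
  (pvN ls).filter (fun s => !keywords.isEmpty && keywords.any (fun k => PySem.Str.isIn k (PySem.Str.lower s)))

theorem pvN_cons (line : String) (rest : List String) :
    pvN (line :: rest) =
      if PySem.Str.strip line = "" then pvN rest else PySem.Str.strip line :: pvN rest := by
  by_cases hs : PySem.Str.strip line = "" <;> simp [pvN, hs]


theorem pvM_cons (keywords : List String) (line : String) (rest : List String) :
    pvM keywords (line :: rest) =
      if PySem.Str.strip line = "" then pvM keywords rest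
      else if (!keywords.isEmpty && keywords.any (fun k =>
          PySem.Str.isIn k (PySem.Str.lower (PySem.Str.strip line)))) then
        PySem.Str.strip line :: pvM keywords rest
      else pvM keywords rest := by
  simp only [pvM, pvN_cons]
  by_cases hs : PySem.Str.strip line = ""
  · simp [hs]
  · rw [if_neg hs, if_neg hs, List.filter_cons]

-- appending the 4th element saturates take 4
theorem pvTakeFourCons (picked : List String) (x : String) (ys : List String)
    (h : picked.length = 3) : (picked ++ x :: ys).take 4 = picked ++ [x] := by
  rw [show picked ++ x :: ys = (picked ++ [x]) ++ ys by simp,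
    List.take_append_of_le_length (by simp [h]), List.take_of_length_le (by simp [h])]

-- invariant of A's keyword loop
theorem pvPickKw_eq (keywords : List String) (ls picked : List String)
    (h : picked.length < 4) :
    pvPickKw keywords ls picked = (picked ++ pvM keywords ls).take 4 := by
  induction ls generalizing picked with
  | nil =>
    simp [pvPickKw, pvM, pvN, List.take_of_length_le (by omega : picked.length ≤ 4)]
  | cons line rest ih =>
    simp only [pvPickKw]
    by_cases hs : PySem.Str.strip line = ""
    · rw [if_pos hs, ih _ h]
      simp [pvM, pvN_cons, hs]
    · rw [if_neg hs]
      by_cases hm : (!keywords.isEmpty && keywords.any (fun k =>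
          PySem.Str.isIn k (PySem.Str.lower (PySem.Str.strip line)))) = true
      · rw [if_pos hm]
        have hMs : pvM keywords (line :: rest) = PySem.Str.strip line :: pvM keywords rest := by
          rw [pvM_cons, if_neg hs, if_pos hm]
        by_cases h4 : (picked ++ [PySem.Str.strip line]).length = 4
        · rw [if_pos h4, hMs, pvTakeFourCons _ _ _ (by simpa using h4)]
        · have hlt : (picked ++ [PySem.Str.strip line]).length < 4 := by
            simp at h4 ⊢; omega
          rw [if_neg h4, ih _ hlt, hMs]; simp
      · rw [if_neg hm, if_neg (by omega : ¬ picked.length = 4), ih _ h]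
        have : pvM keywords (line :: rest) = pvM keywords rest := by
          rw [pvM_cons, if_neg hs, if_neg hm]
        rw [this]

-- invariant of A's fb loop
theorem pvPickAll_eq (ls picked : List String) (h : picked.length < 4) :
    pvPickAll ls picked = (picked ++ pvN ls).take 4 := by
  induction ls generalizing picked with
  | nil =>
    simp [pvPickAll, pvN, List.take_of_length_le (by omega : picked.length ≤ 4)]
  | cons line rest ih =>
    simp only [pvPickAll]
    rw [pvN_cons]
    by_cases hs : PySem.Str.strip line = ""
    · rw [if_pos hs, if_pos hs, if_neg (by omega : ¬ picked.length = 4), ih _ h]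
    · rw [if_neg hs, if_neg hs]
      by_cases h4 : (picked ++ [PySem.Str.strip line]).length = 4
      · rw [if_pos h4, pvTakeFourCons _ _ _ (by simpa using h4)]
      · have hlt : (picked ++ [PySem.Str.strip line]).length < 4 := by
          simp at h4 ⊢; omega
        rw [if_neg h4, ih _ hlt]; simp

-- first component of B's scan: the ms, truncated to 4
theorem pvScan_fst (keywords : List String) (ls ms fb : List String)
    (h : ms.length < 4) :
    (pvScan keywords ls ms fb).1 = (ms ++ pvM keywords ls).take 4 := by
  induction ls generalizing ms fb with
  | nil =>
    simp [pvScan, pvM, pvN, List.take_of_length_le (by omega : ms.length ≤ 4)]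
  | cons line rest ih =>
    simp only [pvScan]
    by_cases hs : PySem.Str.strip line = ""
    · rw [if_pos hs, ih _ _ h]; simp [pvM, pvN_cons, hs]
    · rw [if_neg hs]
      by_cases hm : (!keywords.isEmpty && keywords.any (fun k =>
          PySem.Str.isIn k (PySem.Str.lower (PySem.Str.strip line)))) = true
      · rw [if_pos hm]
        have hMs : pvM keywords (line :: rest) = PySem.Str.strip line :: pvM keywords rest := by
          rw [pvM_cons, if_neg hs, if_pos hm]
        by_cases h4 : (ms ++ [PySem.Str.strip line]).length = 4
        · rw [if_pos h4, hMs, pvTakeFourCons _ _ _ (by simpa using h4)]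
        · have hlt : (ms ++ [PySem.Str.strip line]).length < 4 := by
            simp at h4 ⊢; omega
          rw [if_neg h4, ih _ _ hlt, hMs]; simp
      · rw [if_neg hm, ih _ _ h]
        have : pvM keywords (line :: rest) = pvM keywords rest := by
          rw [pvM_cons, if_neg hs, if_neg hm]
        rw [this]

-- when no line ms, B's scan leaves ms untouched and fills the fb
theorem pvScan_noMatch (keywords : List String) (ls : List String)
    (hM : pvM keywords ls = []) (ms fb : List String)
    (hf : fb.length ≤ 4) :
    pvScan keywords ls ms fb = (ms, (fb ++ pvN ls).take 4) := by
  induction ls generalizing fb with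
  | nil =>
    simp [pvScan, pvN, List.take_of_length_le (by omega : fb.length ≤ 4)]
  | cons line rest ih =>
    simp only [pvScan]
    by_cases hs : PySem.Str.strip line = ""
    · have hM' : pvM keywords rest = [] := by rw [pvM_cons, if_pos hs] at hM; exact hM
      rw [if_pos hs, ih hM' _ hf]
      simp [pvN_cons, hs]
    · have hm : (!keywords.isEmpty && keywords.any (fun k =>
          PySem.Str.isIn k (PySem.Str.lower (PySem.Str.strip line)))) = false := by
        by_contra hc
        have : pvM keywords (line :: rest) =
            PySem.Str.strip line :: pvM keywords rest := by
          rw [pvM_cons, if_neg hs, if_pos (by simpa using hc)]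
        simp [this] at hM
      have hM' : pvM keywords rest = [] := by rw [pvM_cons, if_neg hs, if_neg (by rw [hm]; simp)] at hM; exact hM
      rw [if_neg hs, if_neg (by rw [hm]; simp)]
      by_cases hlt : fb.length < 4
      · rw [if_pos hlt, ih hM' _ (by simp; omega)]
        simp [pvN_cons, hs]
      · have h4 : fb.length = 4 := by omega
        rw [if_neg hlt, ih hM' _ hf, pvN_cons, if_neg hs]
        have : (fb ++ PySem.Str.strip line :: pvN rest).take 4 = fb := by
          rw [show fb ++ PySem.Str.strip line :: pvN rest
              = fb ++ (PySem.Str.strip line :: pvN rest) from rfl,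
            List.take_append_of_le_length (by omega), List.take_of_length_le (by omega)]
        rw [this, List.take_append_of_le_length (by omega),
          List.take_of_length_le (by omega)]

-- ===== VERDICT (by name: the statement is the Claim_ definition above) =====
theorem salient_lines_py_spec : Claim_equal_salient_lines_py := by
  intro text keywords _
  unfold Spec_salient_lines_py
  simp only [salient_lines_py, salient_lines_py_alt]
  set ls := PySem.Str.splitlines text with hls
  rw [pvPickKw_eq keywords ls [] (by simp), List.nil_append]
  by_cases hM : pvM keywords ls = []
  · rw [pvScan_noMatch keywords ls hM [] [] (by simp)]
    simp [hM, pvPickAll_eq ls [] (by simp)]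
  · have h1 : (pvScan keywords ls [] []).1 = (pvM keywords ls).take 4 := by
      rw [pvScan_fst keywords ls [] [] (by simp), List.nil_append]
    have hne : (pvM keywords ls).take 4 ≠ [] := by
      simp [List.take_eq_nil_iff, hM]
    rw [if_neg hne, if_neg (h1 ▸ hne), h1]
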